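-- pv_equiv track=rewrite | github.com/AngelicaDiazB14/CLASESP. | clase 1 intro.py | superImpar_aux
-- ===== SOURCE A (Python) =====
-- def superImpar_aux(num):
--     if(num < 10):
--         if((num % 10) % 2 != 0):
--             return 1
--         else:
--             return -1 #va restando cuando el numero es par
--     else:
--         if((num % 10) % 2 != 0):
--             return 1 + superImpar_aux(num // 10)
--         else:
--             return -1 + superImpar_aux(num // 10)
-- ===== SOURCE B (Python) =====
-- def superImpar_aux(num):
--     total = 0
--     while num >= 10:
--         total += 1 if (num % 10) % 2 != 0 else -1
--         num //= 10
--     return total + (1 if (num % 10) % 2 != 0 else -1)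
-- ===== Notes on version B (the rewrite author's own statement) =====
-- stated objective: simpler
-- what changed: Replaced the recursive per-digit descent with an iterative while-loop accumulating the same plus-or-minus-one contribution per digit.
import Mathlib
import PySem

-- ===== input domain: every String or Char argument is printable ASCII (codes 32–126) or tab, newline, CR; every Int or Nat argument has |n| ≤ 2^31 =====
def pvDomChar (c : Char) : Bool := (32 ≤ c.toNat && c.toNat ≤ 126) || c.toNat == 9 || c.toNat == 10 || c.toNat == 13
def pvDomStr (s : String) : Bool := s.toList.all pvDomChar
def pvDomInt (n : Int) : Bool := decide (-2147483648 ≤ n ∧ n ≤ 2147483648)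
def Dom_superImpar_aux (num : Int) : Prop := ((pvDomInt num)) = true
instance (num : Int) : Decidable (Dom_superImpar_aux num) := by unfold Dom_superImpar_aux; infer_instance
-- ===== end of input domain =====

-- B replaces the recursion by an iterative while-loop with an accumulator; same per-digit parity rule.

-- termination helper used by both ports
theorem pv_div10_lt (num : Int) (h : ¬ num < 10) : (PySem.Int.floordiv num 10).toNat < num.toNat := by
  rw [show num = ((num.toNat : Nat) : Int) by omega,
      show ((10 : Int)) = ((10 : Nat) : Int) from rfl,
      PySem.Int.floordiv_natCast]
  simp only [Int.toNat_natCast]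
  exact Nat.div_lt_self (by omega) (by omega)

-- ===== PORT A =====
def superImpar_aux (num : Int) : Int :=
  if num < 10 then
    if PySem.Int.mod (PySem.Int.mod num 10) 2 ≠ 0 then 1 else -1
  else
    if PySem.Int.mod (PySem.Int.mod num 10) 2 ≠ 0 then
      1 + superImpar_aux (PySem.Int.floordiv num 10)
    else
      -1 + superImpar_aux (PySem.Int.floordiv num 10)
termination_by num.toNat
decreasing_by all_goals exact pv_div10_lt num (by assumption)

-- ===== PORT B =====
-- the while-loop of Source B: state (num, total)
def superImparLoop (num total : Int) : Int :=
  if num ≥ 10 then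
    superImparLoop (PySem.Int.floordiv num 10)
      (total + (if PySem.Int.mod (PySem.Int.mod num 10) 2 ≠ 0 then 1 else -1))
  else
    total + (if PySem.Int.mod (PySem.Int.mod num 10) 2 ≠ 0 then 1 else -1)
termination_by num.toNat
decreasing_by exact pv_div10_lt num (by omega)

def superImpar_aux_alt (num : Int) : Int := superImparLoop num 0

-- ===== PRECONDITION & SPEC =====
def Spec_superImpar_aux (num : Int) (out : Int) : Prop := out = superImpar_aux_alt num
instance (num : Int) (out : Int) : Decidable (Spec_superImpar_aux num out) := by unfold Spec_superImpar_aux; infer_instance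

-- ===== CLAIM (what is proved, stated in full; the proofs are below) =====
def Claim_equal_superImpar_aux : Prop := ∀ (num : Int), Dom_superImpar_aux num → Spec_superImpar_aux num (superImpar_aux num)

-- ===== LEMMAS AND PROOFS =====
theorem superImparLoop_eq (num total : Int) :
    superImparLoop num total = total + superImpar_aux num := by
  rw [superImparLoop, superImpar_aux]
  by_cases h : num < 10
  · simp [h, show ¬ num ≥ 10 by omega]
  · have hge : num ≥ 10 := by omega
    rw [if_pos hge, if_neg h, superImparLoop_eq]
    split <;> ring
termination_by num.toNat
decreasing_by exact pv_div10_lt num h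

-- ===== VERDICT (by name: the statement is the Claim_ definition above) =====
theorem superImpar_aux_spec : Claim_equal_superImpar_aux := by
  intro num _
  unfold Spec_superImpar_aux superImpar_aux_alt
  rw [superImparLoop_eq, zero_add]
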